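-- pv_equiv track=rewrite | github.com/zuhairsiddiqui/GeoSenseAssist-Project | website/views.py | clean_quiz_text
-- ===== SOURCE A (Python) =====
-- def clean_quiz_text(quiz_text):
--     # Split smartly so each Question and each Option are separate (this way the quiz doesn't break)
--     lines = []
--     for raw_line in quiz_text.split('\n'):
--         raw_line = raw_line.strip()
--         if raw_line.startswith(('A.', 'B.', 'C.', 'D.')):
--             # Options are sometimes clumped, this will split if its needed
--             parts = raw_line.split(' ')
--             buffer = ''
--             for part in parts:
--                 if part in ['A.', 'B.', 'C.', 'D.']:
--                     if buffer:
--                         lines.append(buffer.strip())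
--                     buffer = part
--                 else:
--                     buffer += ' ' + part
--             if buffer:
--                 lines.append(buffer.strip())
--         else:
--             if raw_line:
--                 lines.append(raw_line)
--     return lines
-- ===== SOURCE B (Python) =====
-- def _chunks(parts):
--     # Recursively cut the token list before each marker token and join each run.
--     if not parts:
--         return []
--     i = 1
--     while i < len(parts) and parts[i] not in ('A.', 'B.', 'C.', 'D.'):
--         i += 1
--     return [' '.join(parts[:i]).strip()] + _chunks(parts[i:])
--
--
-- def clean_quiz_text(quiz_text):
--     lines = []
--     for raw_line in quiz_text.split('\n'):
--         raw_line = raw_line.strip()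
--         if raw_line.startswith(('A.', 'B.', 'C.', 'D.')):
--             lines.extend(_chunks(raw_line.split(' ')))
--         elif raw_line:
--             lines.append(raw_line)
--     return lines
-- ===== Notes on version B (the rewrite author's own statement) =====
-- stated objective: simpler
-- what changed: The inner word-buffering loop with a string accumulator is replaced by a recursive splitter that cuts the token list before each marker token (A./B./C./D.) and space-joins each run.
import Mathlib
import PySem

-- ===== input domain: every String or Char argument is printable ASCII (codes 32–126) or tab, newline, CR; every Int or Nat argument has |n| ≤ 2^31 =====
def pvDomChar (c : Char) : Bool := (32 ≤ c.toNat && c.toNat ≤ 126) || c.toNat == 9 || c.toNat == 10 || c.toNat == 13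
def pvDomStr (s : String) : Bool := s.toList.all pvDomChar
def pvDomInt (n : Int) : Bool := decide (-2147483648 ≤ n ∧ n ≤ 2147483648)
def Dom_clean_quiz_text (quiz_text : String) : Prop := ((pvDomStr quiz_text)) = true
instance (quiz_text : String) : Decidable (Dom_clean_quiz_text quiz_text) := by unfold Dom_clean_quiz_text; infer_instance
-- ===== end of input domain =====

-- B replaces A's inner buffer-accumulating loop by a recursive splitter that cuts the token
-- list before each marker token and joins each run (objective: simpler decomposition).

-- shared helpers (both Pythons test the same marker membership / startswith tuple / split)
def pvSplit (s sep : String) : List String := (PySem.Str.split? s sep).getD []  -- exact for sep ≠ ""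
def pvIsMark (p : String) : Bool := ["A.", "B.", "C.", "D."].contains p
def pvIsOption (raw : String) : Bool :=
  PySem.Str.startswith raw "A." || PySem.Str.startswith raw "B." ||
  PySem.Str.startswith raw "C." || PySem.Str.startswith raw "D."

-- ===== PORT A =====
def pvStepA (st : List String × String) (part : String) : List String × String :=
  if pvIsMark part then
    (if st.2 ≠ "" then st.1 ++ [PySem.Str.strip st.2] else st.1, part)
  else
    (st.1, st.2 ++ " " ++ part)

def pvFlushA (st : List String × String) : List String :=
  if st.2 ≠ "" then st.1 ++ [PySem.Str.strip st.2] else st.1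

def clean_quiz_text (quiz_text : String) : List String :=
  (pvSplit quiz_text "\n").foldl (fun lines raw_line0 =>
    let raw_line := PySem.Str.strip raw_line0
    if pvIsOption raw_line then
      pvFlushA ((pvSplit raw_line " ").foldl pvStepA (lines, ""))
    else
      if raw_line ≠ "" then lines ++ [raw_line] else lines) []

-- ===== PORT B =====
-- the Python while-loop computes the maximal non-marker prefix of the tail, so
-- parts[:i] = head :: takeWhile, parts[i:] = dropWhile (exact)
def pvChunks : List String → List String
  | [] => []
  | t :: ts =>
      PySem.Str.strip (PySem.Str.join " " (t :: ts.takeWhile (fun p => !pvIsMark p)))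
        :: pvChunks (ts.dropWhile (fun p => !pvIsMark p))
  termination_by parts => parts.length
  decreasing_by
    simpa using Nat.lt_succ_of_le (List.length_dropWhile_le _ _)

def clean_quiz_text_alt (quiz_text : String) : List String :=
  (pvSplit quiz_text "\n").foldl (fun lines raw_line0 =>
    let raw_line := PySem.Str.strip raw_line0
    if pvIsOption raw_line then
      lines ++ pvChunks (pvSplit raw_line " ")
    else
      if raw_line ≠ "" then lines ++ [raw_line] else lines) []

-- ===== PRECONDITION & SPEC =====
def Spec_clean_quiz_text (quiz_text : String) (out : List String) : Prop := out = clean_quiz_text_alt quiz_text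
instance (quiz_text : String) (out : List String) : Decidable (Spec_clean_quiz_text quiz_text out) := by unfold Spec_clean_quiz_text; infer_instance

-- ===== CLAIM (what is proved, stated in full; the proofs are below) =====
def Claim_equal_clean_quiz_text : Prop := ∀ (quiz_text : String), Dom_clean_quiz_text quiz_text → Spec_clean_quiz_text quiz_text (clean_quiz_text quiz_text)

-- ===== LEMMAS AND PROOFS =====

-- A's buffer loop, as a recursion on the token list (buffer carried as an argument)
def pvG : String → List String → List String
  | buf, [] => if buf = "" then [] else [PySem.Str.strip buf]
  | buf, p :: ps =>
      if pvIsMark p then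
        (if buf = "" then pvG p ps else PySem.Str.strip buf :: pvG p ps)
      else
        pvG (buf ++ " " ++ p) ps

lemma pvStr_space_append_ne (a b : String) : a ++ " " ++ b ≠ "" := by
  intro h
  rw [← String.toList_inj] at h
  simp at h

lemma pvFoldl_prepend (l : List String) (a x : String) :
    l.foldl (fun u v => u ++ " " ++ v) (a ++ x) = a ++ l.foldl (fun u v => u ++ " " ++ v) x := by
  induction l generalizing x with
  | nil => rfl
  | cons p ps ih =>
      simp only [List.foldl_cons]
      have h : a ++ x ++ " " ++ p = a ++ (x ++ " " ++ p) := by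
        rw [← String.toList_inj]; simp
      rw [h]; exact ih (x ++ " " ++ p)

lemma pvStrip_space (x : String) : PySem.Str.strip (" " ++ x) = PySem.Str.strip x := by
  rw [← String.toList_inj]
  simp only [PySem.Str.toList_strip, String.toList_append]
  have : (" " : String).toList = [' '] := rfl
  rw [this]
  simp [PySem.Chars.strip, PySem.Chars.lstrip, PySem.Chars.isspace]

lemma pvJoin_foldl (l : List String) (x : String) :
    PySem.Str.join " " (x :: l) = l.foldl (fun u v => u ++ " " ++ v) x := by
  induction l generalizing x with
  | nil =>
      rw [← String.toList_inj]
      simp [PySem.Str.toList_join, PySem.Chars.join_singleton]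
  | cons p ps ih =>
      have step : PySem.Str.join " " (x :: p :: ps) = PySem.Str.join " " ((x ++ " " ++ p) :: ps) := by
        rw [← String.toList_inj]
        cases ps with
        | nil =>
            simp [PySem.Str.toList_join, PySem.Chars.join_cons_cons, PySem.Chars.join_singleton]
        | cons q qs =>
            simp [PySem.Str.toList_join, PySem.Chars.join_cons_cons]
      rw [step, ih (x ++ " " ++ p)]
      rfl

lemma pvFoldA_g (parts : List String) : ∀ (acc : List String) (buf : String),
    pvFlushA (parts.foldl pvStepA (acc, buf)) = acc ++ pvG buf parts := by
  induction parts with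
  | nil =>
      intro acc buf
      by_cases h : buf = "" <;> simp [pvFlushA, pvG, h]
  | cons p ps ih =>
      intro acc buf
      simp only [List.foldl_cons]
      by_cases hm : pvIsMark p
      · by_cases hb : buf = ""
        · simp [pvStepA, pvG, hm, hb, ih]
        · simp [pvStepA, pvG, hm, hb, ih, List.append_assoc]
      · simp [pvStepA, pvG, hm, ih]

lemma pvIsMark_ne_empty {p : String} (h : pvIsMark p = true) : p ≠ "" := by
  intro he; subst he; simp [pvIsMark] at h

lemma pvG_chunks (ts : List String) : ∀ (buf : String), buf ≠ "" →
    pvG buf ts =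
      PySem.Str.strip ((ts.takeWhile (fun p => !pvIsMark p)).foldl (fun u v => u ++ " " ++ v) buf)
        :: pvChunks (ts.dropWhile (fun p => !pvIsMark p)) := by
  induction ts with
  | nil => intro buf hb; simp [pvG, pvChunks, hb]
  | cons p ps ih =>
      intro buf hb
      by_cases hm : pvIsMark p
      · have hp : p ≠ "" := pvIsMark_ne_empty hm
        simp only [pvG, hm, if_pos, hb]
        rw [ih p hp]
        simp [pvChunks, hm, pvJoin_foldl]
      · simp only [pvG, hm]
        rw [if_neg (by simp), ih (buf ++ " " ++ p) (pvStr_space_append_ne buf p)]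
        have hp : (fun q => !pvIsMark q) p = true := by simp [hm]
        rw [show List.takeWhile (fun q => !pvIsMark q) (p :: ps)
              = p :: List.takeWhile (fun q => !pvIsMark q) ps from List.takeWhile_cons_of_pos hp,
            show List.dropWhile (fun q => !pvIsMark q) (p :: ps)
              = List.dropWhile (fun q => !pvIsMark q) ps from List.dropWhile_cons_of_pos hp]
        rfl

lemma pvG_empty_chunks (parts : List String) : pvG "" parts = pvChunks parts := by
  cases parts with
  | nil => simp [pvG, pvChunks]
  | cons t ts =>
      by_cases hm : pvIsMark t
      · have ht : t ≠ "" := pvIsMark_ne_empty hm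
        simp only [pvG, hm, if_pos]
        rw [pvG_chunks ts t ht]
        simp [pvChunks, pvJoin_foldl]
      · simp only [pvG, hm]
        rw [if_neg (by simp), pvG_chunks ts ("" ++ " " ++ t) (pvStr_space_append_ne "" t)]
        have h1 : ("" : String) ++ " " ++ t = " " ++ t := by
          rw [← String.toList_inj]; simp
        have h2 : (ts.takeWhile (fun p => !pvIsMark p)).foldl (fun u v => u ++ " " ++ v) (" " ++ t)
            = " " ++ (ts.takeWhile (fun p => !pvIsMark p)).foldl (fun u v => u ++ " " ++ v) t :=
          pvFoldl_prepend _ " " t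
        rw [h1, h2, pvStrip_space]
        simp [pvChunks, pvJoin_foldl]

-- ===== VERDICT (by name: the statement is the Claim_ definition above) =====
theorem clean_quiz_text_spec : Claim_equal_clean_quiz_text := by
  intro quiz_text _
  show clean_quiz_text quiz_text = clean_quiz_text_alt quiz_text
  unfold clean_quiz_text clean_quiz_text_alt
  have hfun : (fun (lines : List String) (raw_line0 : String) =>
      let raw_line := PySem.Str.strip raw_line0
      if pvIsOption raw_line then
        pvFlushA ((pvSplit raw_line " ").foldl pvStepA (lines, ""))
      else if raw_line ≠ "" then lines ++ [raw_line] else lines)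
    = (fun (lines : List String) (raw_line0 : String) =>
      let raw_line := PySem.Str.strip raw_line0
      if pvIsOption raw_line then
        lines ++ pvChunks (pvSplit raw_line " ")
      else if raw_line ≠ "" then lines ++ [raw_line] else lines) := by
    funext lines raw0
    dsimp only
    cases ho : pvIsOption (PySem.Str.strip raw0) with
    | false => simp
    | true =>
        simp only [if_true]
        rw [pvFoldA_g _ lines "", pvG_empty_chunks]
  rw [hfun]
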